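-- pv_equiv track=rewrite | github.com/super30admin/BFS-4 | Snake and ladder.py | flattenBoard
-- ===== SOURCE A (Python) =====
-- def flattenBoard(board):
--     n = len(board)
--     moves = [0 for i in range(n * n + 1)]
--     even = 0
--     i = n - 1
--     j = 0
--     idx = 1
--     while i >= 0 and j >= 0:
--         moves[idx] = board[i][j]
--         idx += 1
--         if even % 2 == 0:
--             j += 1
--             if j == n:
--                 i -= 1
--                 even += 1
--                 j -= 1
--         else:
--             j -= 1
--             if j == -1:
--                 i -= 1
--                 even += 1
--                 j += 1
--     return moves
-- ===== SOURCE B (Python) =====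
-- def flattenBoard(board):
--     n = len(board)
--     moves = [0]
--     for t in range(n):
--         row = board[n - 1 - t][:n]
--         moves += row if t % 2 == 0 else row[::-1]
--     return moves
-- ===== Notes on version B (the rewrite author's own statement) =====
-- stated objective: simpler
-- what changed: Replaces A's cell-by-cell pointer-walking while loop (manual even counter, j wrap corrections, index writes into a pre-filled array) with a per-row loop from the bottom row up that extends a growing list with each row's n-cell prefix, reversed on odd rows.
import Mathlib
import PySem

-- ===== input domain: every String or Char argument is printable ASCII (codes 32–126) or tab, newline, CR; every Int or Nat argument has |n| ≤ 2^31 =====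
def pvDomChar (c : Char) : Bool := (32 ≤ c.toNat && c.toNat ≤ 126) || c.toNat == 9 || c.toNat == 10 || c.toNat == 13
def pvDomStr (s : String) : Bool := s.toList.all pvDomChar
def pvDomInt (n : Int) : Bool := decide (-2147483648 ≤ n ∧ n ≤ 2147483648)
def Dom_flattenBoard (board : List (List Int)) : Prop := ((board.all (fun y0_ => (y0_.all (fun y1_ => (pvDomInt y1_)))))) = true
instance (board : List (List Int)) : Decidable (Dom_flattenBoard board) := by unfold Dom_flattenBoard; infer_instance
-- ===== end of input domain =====

-- B replaces A's cell-by-cell pointer-walking while loop with a per-row loop (bottom row up,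
-- odd rows reversed, each row's n-cell prefix appended to a growing list); equal output on
-- every board whose rows have length ≥ len(board) (elsewhere A raises IndexError).

-- ===== PORT A =====
-- literal port of A's while loop; the fuel n*n is a totality guard only (on square boards the
-- loop runs exactly n*n iterations).  board[i][j] / moves[idx] are in range under Pre_, so
-- pyGetD's default and List.set's out-of-range no-op are never reached inside Pre_.
def flattenLoop (board : List (List Int)) (n : Int) :
    Nat → List Int → Int → Int → Int → Int → List Int
  | 0, moves, _, _, _, _ => moves
  | fuel+1, moves, even, i, j, idx =>
    if 0 ≤ i ∧ 0 ≤ j then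
      let moves' := moves.set idx.toNat (PySem.List.pyGetD (PySem.List.pyGetD board i []) j 0)
      let idx' := idx + 1
      if even % 2 = 0 then
        let j' := j + 1
        if j' = n then flattenLoop board n fuel moves' (even+1) (i-1) (j'-1) idx'
        else flattenLoop board n fuel moves' even i j' idx'
      else
        let j' := j - 1
        if j' = -1 then flattenLoop board n fuel moves' (even+1) (i-1) (j'+1) idx'
        else flattenLoop board n fuel moves' even i j' idx'
    else moves

def flattenBoard (board : List (List Int)) : List Int :=
  let n := board.length
  flattenLoop board (n : Int) (n*n) (List.replicate (n*n+1) 0) 0 ((n : Int)-1) 0 1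

-- ===== PORT B =====
def flattenBoard_alt (board : List (List Int)) : List Int :=
  let n := board.length
  (List.range n).foldl
    (fun (moves : List Int) (t : Nat) =>
      moves ++
        (let row := PySem.List.slice (PySem.List.pyGetD board ((n : Int) - 1 - (t : Int)) []) none (some (n : Int))
         if t % 2 = 0 then row else row.reverse))
    [0]

-- ===== PRECONDITION & SPEC =====
-- Pre_ excludes exactly the boards with a row shorter than len(board), on which A raises IndexError.
def Pre_flattenBoard (board : List (List Int)) : Prop :=
  ∀ row ∈ board, board.length ≤ row.length
instance (board : List (List Int)) : Decidable (Pre_flattenBoard board) := by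
  unfold Pre_flattenBoard; infer_instance
def pvWitness_flattenBoard : List (List Int) := [[1, 2], [3, 4]]

def Spec_flattenBoard (board : List (List Int)) (out : List Int) : Prop := out = flattenBoard_alt board
instance (board : List (List Int)) (out : List Int) : Decidable (Spec_flattenBoard board out) := by unfold Spec_flattenBoard; infer_instance

-- ===== CLAIM (what is proved, stated in full; the proofs are below) =====
def Claim_equal_flattenBoard : Prop := ∀ (board : List (List Int)), Dom_flattenBoard board → Pre_flattenBoard board → Spec_flattenBoard board (flattenBoard board)

-- ===== LEMMAS AND PROOFS =====

-- sequential writes moves[idx], moves[idx+1], … of a list of values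
def writeSeq : List Int → Nat → List Int → List Int
  | moves, _, [] => moves
  | moves, idx, a :: L => writeSeq (moves.set idx a) (idx+1) L

-- the boustrophedon concatenation of rows k-1, k-2, …, 0, starting with parity p
def segs (board : List (List Int)) : Nat → Int → List Int
  | 0, _ => []
  | k+1, p =>
      (if p % 2 = 0 then (board.getD k []).take board.length
       else ((board.getD k []).take board.length).reverse) ++ segs board k (p+1)

theorem writeSeq_eq (L : List Int) (moves : List Int) (idx : Nat)
    (h : idx + L.length ≤ moves.length) :
    writeSeq moves idx L = moves.take idx ++ L ++ moves.drop (idx + L.length) := by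
  induction L generalizing moves idx with
  | nil => simp [writeSeq]
  | cons a L ih =>
    have hidx : idx < moves.length := by simp at h; omega
    simp only [writeSeq]
    rw [ih (moves.set idx a) (idx+1) (by simp at h ⊢; omega)]
    rw [List.set_eq_take_append_cons_drop, if_pos hidx]
    have hX : (List.take idx moves).length = idx := by simp [Nat.le_of_lt hidx]
    have e1 : List.take (idx+1) (List.take idx moves ++ a :: List.drop (idx+1) moves)
        = List.take idx moves ++ [a] := by
      rw [show idx + 1 = (List.take idx moves).length + 1 by rw [hX], List.take_append]
      simp
    have e2 : List.drop (idx+1+L.length) (List.take idx moves ++ a :: List.drop (idx+1) moves)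
        = List.drop (idx + (L.length+1)) moves := by
      rw [List.drop_append]
      simp [hX, show idx+1+L.length - idx = L.length + 1 by omega,
        List.drop_succ_cons, List.drop_drop, List.drop_eq_nil_of_le (show (List.take idx moves).length ≤ idx+1+L.length by rw [hX]; omega)]
      congr 1
      omega
    rw [e1, e2]
    simp

theorem writeSeq_append (L1 L2 : List Int) (moves : List Int) (idx : Nat) :
    writeSeq moves idx (L1 ++ L2) = writeSeq (writeSeq moves idx L1) (idx + L1.length) L2 := by
  induction L1 generalizing moves idx with
  | nil => simp [writeSeq]
  | cons a L ih =>
    simp only [List.cons_append, writeSeq, ih, List.length_cons]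
    ring_nf

theorem row_even (board : List (List Int)) (row : List Int) (i : Int) (hi : 0 ≤ i)
    (hrow : row = (PySem.List.pyGetD board i []).take board.length)
    (hfull : board.length ≤ (PySem.List.pyGetD board i []).length)
    (s : Nat) (hs : (s : Int) ≤ (board.length : Int) - 1)
    (p : Int) (hp : p % 2 = 0) (f : Nat) (moves : List Int) (idx : Nat) :
    flattenLoop board (board.length : Int) (s + 1 + f) moves p i ((board.length : Int) - 1 - s) idx
      = flattenLoop board (board.length : Int) f
          (writeSeq moves idx (row.drop (board.length - 1 - s)))
          (p+1) (i-1) ((board.length : Int) - 1) (idx + s + 1) := by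
  induction s generalizing moves idx with
  | zero =>
    have hn : (1:Int) ≤ (board.length:Int) := by exact_mod_cast by omega
    rw [show (0:Nat)+1+f = f+1 by omega]
    simp only [flattenLoop]
    rw [if_pos (And.intro hi (by push_cast; omega))]
    rw [if_pos hp]
    rw [if_pos (by push_cast; ring)]
    have hr : row.length = board.length := by rw [hrow, List.length_take]; omega
    have hget : ∀ m, m < board.length → (PySem.List.pyGetD board i []).getD m 0 = row.getD m 0 := by
      intro m hm
      rw [List.getD_eq_getElem _ _ (show m < (PySem.List.pyGetD board i []).length by omega),
        List.getD_eq_getElem _ _ (show m < row.length by omega)]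
      subst hrow
      simp
    have hlt : board.length - 1 < row.length := by omega
    rw [show ((board.length : Int) - 1 - ((0:Nat) : Int)) = (((board.length - 1 : Nat)) : Int) by
        push_cast; omega,
      PySem.List.pyGetD_natCast, hget _ (by omega)]
    have hd : List.drop (board.length - 1 - 0) row = [row.getD (board.length - 1) 0] := by
      rw [Nat.sub_zero, List.drop_eq_getElem_cons hlt,
        List.drop_eq_nil_of_le (by omega : row.length ≤ board.length - 1 + 1)]
      simp [hlt]
    rw [hd]
    simp only [writeSeq, Int.toNat_natCast]
    congr 1
    omega
  | succ s ih =>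
    have hr : row.length = board.length := by rw [hrow, List.length_take]; omega
    have hget : ∀ m, m < board.length → (PySem.List.pyGetD board i []).getD m 0 = row.getD m 0 := by
      intro m hm
      rw [List.getD_eq_getElem _ _ (show m < (PySem.List.pyGetD board i []).length by omega),
        List.getD_eq_getElem _ _ (show m < row.length by omega)]
      subst hrow
      simp
    have hs' : (s : Int) ≤ (board.length : Int) - 1 := by push_cast at hs ⊢; omega
    have hsn : s + 2 ≤ board.length := by push_cast at hs; omega
    rw [show s+1+1+f = (s+1+f)+1 by omega]
    simp only [flattenLoop]
    rw [if_pos (And.intro hi (by push_cast; omega))]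
    rw [if_pos hp]
    rw [if_neg (by push_cast; omega)]
    rw [show ((board.length : Int) - 1 - ((s+1 : Nat) : Int) + 1) = (board.length : Int) - 1 - (s : Int) by push_cast; ring,
      show ((idx : Int) + 1) = ((idx + 1 : Nat) : Int) by push_cast; ring,
      ih hs' _ (idx+1)]
    have hlt : board.length - 1 - (s+1) < row.length := by omega
    have hd : List.drop (board.length - 1 - (s+1)) row
        = row.getD (board.length - 1 - (s+1)) 0 :: List.drop (board.length - 1 - s) row := by
      rw [List.drop_eq_getElem_cons hlt, List.getD_eq_getElem _ _ hlt,
        show board.length - 1 - (s+1) + 1 = board.length - 1 - s by omega]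
    rw [hd]
    simp only [writeSeq, Int.toNat_natCast]
    congr 2
    · rw [show ((board.length : Int) - 1 - ((s+1 : Nat) : Int)) = (((board.length - 1 - (s+1) : Nat)) : Int) by
          push_cast; omega,
        PySem.List.pyGetD_natCast, hget _ (by omega)]
    · push_cast; ring

theorem row_odd (board : List (List Int)) (row : List Int) (i : Int) (hi : 0 ≤ i)
    (hrow : row = (PySem.List.pyGetD board i []).take board.length)
    (hfull : board.length ≤ (PySem.List.pyGetD board i []).length)
    (s : Nat) (hs : (s : Int) ≤ (board.length : Int) - 1)
    (p : Int) (hp : ¬ p % 2 = 0) (f : Nat) (moves : List Int) (idx : Nat) :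
    flattenLoop board (board.length : Int) (s + 1 + f) moves p i (s : Int) idx
      = flattenLoop board (board.length : Int) f
          (writeSeq moves idx ((row.take (s+1)).reverse))
          (p+1) (i-1) 0 (idx + s + 1) := by
  induction s generalizing moves idx with
  | zero =>
    have hr : row.length = board.length := by rw [hrow, List.length_take]; omega
    have hget : ∀ m, m < board.length → (PySem.List.pyGetD board i []).getD m 0 = row.getD m 0 := by
      intro m hm
      rw [List.getD_eq_getElem _ _ (show m < (PySem.List.pyGetD board i []).length by omega),
        List.getD_eq_getElem _ _ (show m < row.length by omega)]
      subst hrow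
      simp
    rw [show (0:Nat)+1+f = f+1 by omega]
    simp only [flattenLoop]
    rw [if_pos (And.intro hi (by norm_num))]
    rw [if_neg hp]
    rw [if_pos (by norm_num)]
    have hlt : 0 < row.length := by omega
    have ht : (row.take (0+1)).reverse = [row.getD 0 0] := by
      rw [List.take_add_one, List.getElem?_eq_getElem hlt]
      simp [List.getD, List.getElem?_eq_getElem hlt]
    rw [ht, PySem.List.pyGetD_natCast, hget 0 (by omega)]
    simp only [writeSeq, Int.toNat_natCast]
    congr 1
  | succ s ih =>
    have hr : row.length = board.length := by rw [hrow, List.length_take]; omega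
    have hget : ∀ m, m < board.length → (PySem.List.pyGetD board i []).getD m 0 = row.getD m 0 := by
      intro m hm
      rw [List.getD_eq_getElem _ _ (show m < (PySem.List.pyGetD board i []).length by omega),
        List.getD_eq_getElem _ _ (show m < row.length by omega)]
      subst hrow
      simp
    have hs' : (s : Int) ≤ (board.length : Int) - 1 := by push_cast at hs ⊢; omega
    have hsn : s + 2 ≤ board.length := by push_cast at hs; omega
    rw [show s+1+1+f = (s+1+f)+1 by omega]
    simp only [flattenLoop]
    rw [if_pos (And.intro hi (by push_cast; omega))]
    rw [if_neg hp]
    rw [if_neg (by push_cast; omega)]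
    rw [show (((s+1 : Nat) : Int) - 1) = ((s : Nat) : Int) by push_cast; ring,
      show ((idx : Int) + 1) = ((idx + 1 : Nat) : Int) by push_cast; ring,
      ih hs' _ (idx+1)]
    have hlt : s + 1 < row.length := by omega
    have ht : (row.take (s+1+1)).reverse
        = row.getD (s+1) 0 :: (row.take (s+1)).reverse := by
      rw [List.take_add_one, List.getElem?_eq_getElem hlt]
      simp [List.getD, List.getElem?_eq_getElem hlt]
    rw [ht]
    simp only [writeSeq, Int.toNat_natCast]
    congr 2
    · rw [PySem.List.pyGetD_natCast, hget _ (by omega)]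
    · push_cast; ring

theorem loop_rows (board : List (List Int)) (hsq : Pre_flattenBoard board)
    (k : Nat) (hk : k ≤ board.length) (p : Int) (moves : List Int) (idx : Nat) :
    flattenLoop board (board.length : Int) (k * board.length) moves p ((k : Int) - 1)
        (if p % 2 = 0 then 0 else (board.length : Int) - 1) idx
      = writeSeq moves idx (segs board k p) := by
  induction k generalizing p moves idx with
  | zero =>
    rw [Nat.zero_mul]
    simp [flattenLoop, segs, writeSeq]
  | succ k ih =>
    have hkl : k < board.length := hk
    have hge1 : 1 ≤ board.length := by omega
    have hrowmem : board.getD k [] ∈ board := by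
      rw [List.getD_eq_getElem _ _ hkl]; exact List.getElem_mem hkl
    have hfl : board.length ≤ (board.getD k []).length := hsq _ hrowmem
    have hrow : ((board.getD k []).take board.length : List Int)
        = (PySem.List.pyGetD board (k : Int) []).take board.length := by
      rw [PySem.List.pyGetD_natCast]
    have hfull : board.length ≤ (PySem.List.pyGetD board (k : Int) []).length := by
      rw [PySem.List.pyGetD_natCast]; exact hfl
    have hrl : ((board.getD k []).take board.length).length = board.length := by
      rw [List.length_take]; omega
    have hfuel : (k+1) * board.length = (board.length - 1) + 1 + (k * board.length) := by
      rw [show (board.length - 1) + 1 = board.length by omega, Nat.succ_mul, Nat.add_comm]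
    have hik : ((k+1 : Nat) : Int) - 1 = (k : Int) := by push_cast; ring
    have hs1 : ((board.length - 1 : Nat) : Int) ≤ (board.length : Int) - 1 := by omega
    rw [hfuel, hik]
    by_cases hpar : p % 2 = 0
    · rw [if_pos hpar,
        show (0 : Int) = (board.length : Int) - 1 - ((board.length - 1 : Nat) : Int) by omega,
        row_even board ((board.getD k []).take board.length) (k : Int) (by positivity) hrow hfull
          (board.length - 1) hs1 p hpar (k * board.length) moves idx,
        show board.length - 1 - (board.length - 1) = 0 by omega, List.drop_zero,
        show ((idx : Int) + ((board.length - 1 : Nat) : Int) + 1) = ((idx + board.length : Nat) : Int) by push_cast; omega,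
        show ((board.length : Int) - 1) = (if (p+1) % 2 = 0 then 0 else (board.length : Int) - 1) by rw [if_neg (by omega)],
        ih (by omega) (p+1) _ (idx + board.length)]
      rw [show segs board (k+1) p
            = (board.getD k []).take board.length ++ segs board k (p+1) by rw [segs, if_pos hpar],
        writeSeq_append, hrl]
    · rw [if_neg hpar,
        show ((board.length : Int) - 1) = (((board.length - 1 : Nat) : Nat) : Int) by omega,
        row_odd board ((board.getD k []).take board.length) (k : Int) (by positivity) hrow hfull
          (board.length - 1) hs1 p hpar (k * board.length) moves idx,
        show board.length - 1 + 1 = board.length by omega,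
        List.take_of_length_le (le_of_eq hrl),
        show ((idx : Int) + ((board.length - 1 : Nat) : Int) + 1) = ((idx + board.length : Nat) : Int) by push_cast; omega,
        show (0 : Int) = (if (p+1) % 2 = 0 then 0 else (board.length : Int) - 1) by rw [if_pos (by omega)],
        ih (by omega) (p+1) _ (idx + board.length)]
      rw [show segs board (k+1) p
            = ((board.getD k []).take board.length).reverse ++ segs board k (p+1) by rw [segs, if_neg hpar],
        writeSeq_append, List.length_reverse, hrl]

theorem segs_length (board : List (List Int)) (hsq : Pre_flattenBoard board)
    (k : Nat) (hk : k ≤ board.length) (p : Int) :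
    (segs board k p).length = k * board.length := by
  induction k generalizing p with
  | zero => simp [segs]
  | succ k ih =>
    have hkl : k < board.length := hk
    have hrowmem : board.getD k [] ∈ board := by
      rw [List.getD_eq_getElem _ _ hkl]; exact List.getElem_mem hkl
    rw [segs, List.length_append, ih (by omega) (p+1), Nat.succ_mul, Nat.add_comm]
    have hfl : board.length ≤ (board.getD k []).length := hsq _ hrowmem
    congr 1
    by_cases hpar : p % 2 = 0
    · rw [if_pos hpar, List.length_take]; omega
    · rw [if_neg hpar, List.length_reverse, List.length_take]; omega

theorem segs_flatMap (board : List (List Int)) (k : Nat) (p : Int) :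
    segs board k p
      = (List.range k).flatMap (fun (t : Nat) =>
          if (p + (t : Int)) % 2 = 0 then (board.getD (k-1-t : Nat) []).take board.length
          else ((board.getD (k-1-t : Nat) []).take board.length).reverse) := by
  induction k generalizing p with
  | zero => simp [segs]
  | succ k ih =>
    rw [segs, ih (p+1), List.range_succ_eq_map, List.flatMap_cons, List.flatMap_map]
    congr 1
    · simp
    · refine List.flatMap_congr (fun t _ => ?_)
      have h1 : ((p+1) + (t : Int)) = p + (((t+1) : Nat) : Int) := by push_cast; ring
      have h2 : (k-1-t : Nat) = (k+1-1-(t+1) : Nat) := by omega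
      rw [h1, h2]

-- ===== VERDICT (by name: the statement is the Claim_ definition above) =====
theorem flattenBoard_spec : Claim_equal_flattenBoard := by
  intro board _ hsq
  unfold Spec_flattenBoard flattenBoard flattenBoard_alt
  have hA := loop_rows board hsq board.length le_rfl 0
    (List.replicate (board.length*board.length+1) 0) 1
  norm_num at hA
  rw [hA, writeSeq_eq _ _ _ (by rw [segs_length board hsq _ le_rfl, List.length_replicate]; omega),
    segs_length board hsq _ le_rfl,
    PySem.List.foldl_append_eq_flatMap, segs_flatMap,
    List.take_replicate, List.drop_replicate,
    show min 1 (board.length*board.length+1) = 1 by omega,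
    show board.length*board.length+1 - (1+board.length*board.length) = 0 by omega]
  simp only [List.replicate_one, List.replicate_zero, List.append_nil, List.cons_append,
    List.nil_append]
  congr 1
  refine List.flatMap_congr (fun t ht => ?_)
  have htn : t < board.length := List.mem_range.mp ht
  have hcast : ((board.length : Int) - 1 - (t : Int)) = ((board.length - 1 - t : Nat) : Int) := by
    omega
  have hpar : ((0 : Int) + (t : Int)) % 2 = 0 ↔ t % 2 = 0 := by omega
  rw [hcast, PySem.List.pyGetD_natCast, PySem.List.slice_to_natCast, if_congr hpar rfl rfl]
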